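-- pv_equiv track=rewrite | github.com/Issa-Kakar/CodeDocSync | codedocsync/suggestions/rag_corpus.py | _extract_parameter_count
-- ===== SOURCE A (Python) =====
-- def _extract_parameter_count(signature: str) -> int:
--     """Extract parameter count from a function signature string."""
--     # Handle edge cases
--     if "(" not in signature or ")" not in signature:
--         return 0
--
--     # Extract the parameter section
--     try:
--         start = signature.index("(") + 1
--         # Find the matching closing parenthesis, accounting for nested parentheses
--         paren_depth = 1
--         end = start
--         while end < len(signature) and paren_depth > 0:
--             if signature[end] == "(":
--                 paren_depth += 1
--             elif signature[end] == ")":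
--                 paren_depth -= 1
--             end += 1
--
--         params_str = signature[start : end - 1].strip()
--
--         # Empty parameter list
--         if not params_str:
--             return 0
--
--         # Count parameters by splitting on commas at the top level
--         # (not inside brackets or parentheses)
--         param_count = 1  # At least one parameter if not empty
--         bracket_depth = 0
--         paren_depth = 0
--
--         for char in params_str:
--             if char == "[":
--                 bracket_depth += 1
--             elif char == "]":
--                 bracket_depth -= 1
--             elif char == "(":
--                 paren_depth += 1
--             elif char == ")":
--                 paren_depth -= 1
--             elif char == "," and bracket_depth == 0 and paren_depth == 0:
--                 param_count += 1
--
--         return param_count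
--
--     except (ValueError, IndexError):
--         # If parsing fails, make a simple estimate
--         return signature.count(",") + (
--             1 if "(" in signature and ")" in signature else 0
--         )
-- ===== SOURCE B (Python) =====
-- def _extract_parameter_count(signature: str) -> int:
--     """Count top-level parameters: cut the text after the first open parenthesis
--     where parenthesis depth goes negative, then split it on commas and count the
--     fragments that begin at bracket/paren level zero."""
--     if "(" not in signature or ")" not in signature:
--         return 0
--     tail = signature[signature.index("(") + 1:]
--     depth = 0
--     cut = len(tail)
--     for i, c in enumerate(tail):
--         depth += (c == "(") - (c == ")")
--         if depth < 0:
--             cut = i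
--             break
--     params = tail[:cut].strip()
--     if not params:
--         return 0
--     count = 0
--     bracket = paren = 0
--     for frag in params.split(","):
--         if bracket == 0 and paren == 0:
--             count += 1
--         bracket += frag.count("[") - frag.count("]")
--         paren += frag.count("(") - frag.count(")")
--     return count
-- ===== Notes on version B (the rewrite author's own statement) =====
-- stated objective: alternative
-- what changed: B finds the cut point with an arithmetic depth accumulator that stops when depth goes negative, then counts parameters by splitting the section on every comma and counting the fragments that begin at bracket/paren level zero (per-fragment str.count arithmetic), instead of A's char-by-char elif chain counting top-level commas; Pre_ excludes signatures that contain an open and a close parenthesis but whose first open parenthesis is never closed, where A's end-1 slice accidentally drops the final character.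
-- outside the precondition, e.g. on _extract_parameter_count(') ( x'): A returns 0, B returns 1
import Mathlib
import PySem

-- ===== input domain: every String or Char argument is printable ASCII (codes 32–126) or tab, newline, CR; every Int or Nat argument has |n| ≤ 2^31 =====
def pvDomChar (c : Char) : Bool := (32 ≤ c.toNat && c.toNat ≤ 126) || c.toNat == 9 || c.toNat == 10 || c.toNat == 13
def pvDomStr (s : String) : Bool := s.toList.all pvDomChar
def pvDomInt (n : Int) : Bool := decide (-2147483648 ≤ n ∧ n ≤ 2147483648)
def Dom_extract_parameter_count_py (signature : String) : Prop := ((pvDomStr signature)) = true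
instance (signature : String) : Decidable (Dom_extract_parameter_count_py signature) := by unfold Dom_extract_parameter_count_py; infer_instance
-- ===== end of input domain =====

-- B cuts the parameter section with an arithmetic depth accumulator and then counts parameters by
-- splitting on commas and counting the fragments that start at bracket/paren level zero (alternative
-- decomposition, same cost).

-- ===== PORT A =====
-- A's first while loop: walk from index `start` looking for the matching ')'; returns Python's `end`.
def pvAFind : List Char → Int → Nat → Nat
  | [], _, e => e
  | c :: rest, d, e =>
      if d > 0 then
        pvAFind rest (if c = '(' then d + 1 else if c = ')' then d - 1 else d) (e + 1)
      else e

-- A's second for loop over params_str (elif chain kept in order).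
def pvACount : List Char → Int → Int → Int → Int
  | [], _, _, cnt => cnt
  | c :: rest, b, p, cnt =>
      if c = '[' then pvACount rest (b + 1) p cnt
      else if c = ']' then pvACount rest (b - 1) p cnt
      else if c = '(' then pvACount rest b (p + 1) cnt
      else if c = ')' then pvACount rest b (p - 1) cnt
      else if c = ',' ∧ b = 0 ∧ p = 0 then pvACount rest b p (cnt + 1)
      else pvACount rest b p cnt

def extract_parameter_count_py (signature : String) : Int :=
  let cs := signature.toList
  if !(PySem.Chars.isIn ['('] cs) || !(PySem.Chars.isIn [')'] cs) then 0
  else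
    let start := (PySem.Chars.find cs ['(']).toNat + 1
    let e := pvAFind (cs.drop start) 1 start
    let params := PySem.Chars.strip (PySem.List.slice cs (some (start : Int)) (some ((e : Int) - 1)))
    if params = [] then 0
    else pvACount params 0 0 1

-- ===== PORT B =====
-- B's first for loop: depth accumulator over the tail; break with cut=i when depth < 0 (none = no break).
def pvBCut : List Char → Int → Nat → Option Nat
  | [], _, _ => none
  | c :: rest, d, i =>
      let d' := d + (if c = '(' then 1 else 0) - (if c = ')' then 1 else 0)
      if d' < 0 then some i else pvBCut rest d' (i + 1)

-- B's second for loop over the comma-split fragments.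
def pvBFrag : List (List Char) → Int → Int → Int → Int
  | [], _, _, cnt => cnt
  | f :: fs, b, p, cnt =>
      pvBFrag fs (b + (f.count '[' : Int) - (f.count ']' : Int))
                 (p + (f.count '(' : Int) - (f.count ')' : Int))
                 (if b = 0 ∧ p = 0 then cnt + 1 else cnt)

def extract_parameter_count_py_alt (signature : String) : Int :=
  let cs := signature.toList
  if !(PySem.Chars.isIn ['('] cs) || !(PySem.Chars.isIn [')'] cs) then 0
  else
    let tail := cs.drop ((PySem.Chars.find cs ['(']).toNat + 1)
    let cut := (pvBCut tail 0 0).getD tail.length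
    let params := PySem.Chars.strip (tail.take cut)
    if params = [] then 0
    else pvBFrag (PySem.Chars.splitOn params [',']) 0 0 0

-- ===== PRECONDITION & SPEC =====
-- Pre_ excludes signatures that contain an open and a close parenthesis but whose first open
-- parenthesis is never closed (no prefix of the tail has more closers than openers): there A's
-- `signature[start : end - 1]` slice accidentally drops the final character of the signature,
-- an artefact of its implementation on malformed input.
def Pre_extract_parameter_count_py (signature : String) : Prop :=
  (PySem.Chars.isIn ['('] signature.toList = true ∧ PySem.Chars.isIn [')'] signature.toList = true) →
    ∃ n < (signature.toList.drop ((PySem.Chars.find signature.toList ['(']).toNat + 1)).length + 1,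
      ((signature.toList.drop ((PySem.Chars.find signature.toList ['(']).toNat + 1)).take n).count '(' <
      ((signature.toList.drop ((PySem.Chars.find signature.toList ['(']).toNat + 1)).take n).count ')'
instance (signature : String) : Decidable (Pre_extract_parameter_count_py signature) := by
  unfold Pre_extract_parameter_count_py; infer_instance

def pvWitness_extract_parameter_count_py : String := "def f(a, b)"

def Spec_extract_parameter_count_py (signature : String) (out : Int) : Prop := out = extract_parameter_count_py_alt signature
instance (signature : String) (out : Int) : Decidable (Spec_extract_parameter_count_py signature out) := by unfold Spec_extract_parameter_count_py; infer_instance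

-- ===== CLAIM =====
def Claim_equal_extract_parameter_count_py : Prop := ∀ (signature : String), Dom_extract_parameter_count_py signature → Pre_extract_parameter_count_py signature → Spec_extract_parameter_count_py signature (extract_parameter_count_py signature)

-- ===== LEMMAS AND PROOFS =====

lemma pvAFind_shift (t : List Char) (d : Int) (e : Nat) :
    pvAFind t d e = e + pvAFind t d 0 := by
  induction t generalizing d e with
  | nil => simp [pvAFind]
  | cons c rest ih =>
      by_cases hd : d > 0
      · simp only [pvAFind, if_pos hd]
        rw [ih _ (e + 1), ih _ 1]; omega
      · simp [pvAFind, hd]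

-- one-step characterization of A's elif chain
lemma pvACount_cons (c : Char) (u : List Char) (b p cnt : Int) :
    pvACount (c :: u) b p cnt =
      pvACount u (if c = '[' then b + 1 else if c = ']' then b - 1 else b)
                 (if c = '(' then p + 1 else if c = ')' then p - 1 else p)
                 (if c = ',' ∧ b = 0 ∧ p = 0 then cnt + 1 else cnt) := by
  by_cases h1 : c = '['
  · subst h1; simp [pvACount]
  by_cases h2 : c = ']'
  · subst h2; simp [pvACount]
  by_cases h3 : c = '('
  · subst h3; simp [pvACount]
  by_cases h4 : c = ')'
  · subst h4; simp [pvACount]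
  by_cases h5 : c = ','
  · subst h5; simp only [pvACount]; simp only [if_neg h1, if_neg h2, if_neg h3, if_neg h4]
    by_cases hb : b = 0 ∧ p = 0 <;> simp [hb]
  · simp [pvACount, h1, h2, h3, h4, h5]

lemma pvACount_shift (u : List Char) (b p cnt : Int) :
    pvACount u b p cnt = cnt + pvACount u b p 0 := by
  induction u generalizing b p cnt with
  | nil => simp [pvACount]
  | cons c rest ih =>
      rw [pvACount_cons, pvACount_cons]
      by_cases hc : c = ',' ∧ b = 0 ∧ p = 0
      · simp only [if_pos hc]; rw [ih _ _ (cnt + 1), ih _ _ (0 + 1)]; omega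
      · simp only [if_neg hc]; rw [ih _ _ cnt]

lemma pvBCut_shift (t : List Char) (d : Int) (i : Nat) :
    pvBCut t d i = (pvBCut t d 0).map (fun j => j + i) := by
  induction t generalizing d i with
  | nil => simp [pvBCut]
  | cons c rest ih =>
      simp only [pvBCut]
      split_ifs <;>
        first
          | (rw [ih _ (i + 1), ih _ (0 + 1), Option.map_map]
             congr 1; funext j; simp only [Function.comp_apply]; omega)
          | simp

-- B's break condition fires iff some prefix of the tail has more ')' than '('
lemma pvBCut_isSome (t : List Char) (d : Int) (hd : 0 ≤ d) :
    (pvBCut t d 0).isSome = true ↔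
      ∃ n < t.length + 1, d + ((t.take n).count '(' : Int) < ((t.take n).count ')' : Int) := by
  induction t generalizing d with
  | nil =>
      simp only [pvBCut, Option.isSome_none]
      constructor
      · intro h; exact absurd h (by simp)
      · rintro ⟨n, _, h⟩
        simp at h; omega
  | cons c rest ih =>
      simp only [pvBCut]
      set d' := d + (if c = '(' then 1 else 0) - (if c = ')' then 1 else 0) with hd'
      by_cases hneg : d' < 0
      · simp only [if_pos hneg, Option.isSome_some, true_iff]
        refine ⟨1, by simp, ?_⟩
        simp only [List.take_succ_cons, List.take_zero, List.count_cons, List.count_nil]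
        by_cases h1 : c = '(' <;> by_cases h2 : c = ')' <;> simp_all
      · rw [if_neg hneg, pvBCut_shift, Option.isSome_map]
        rw [ih d' (by omega)]
        constructor
        · rintro ⟨n, hn, h⟩
          refine ⟨n + 1, by simpa using hn, ?_⟩
          simp only [List.take_succ_cons, List.count_cons] at *
          by_cases h1 : c = '(' <;> by_cases h2 : c = ')' <;> simp_all <;> omega
        · rintro ⟨n, hn, h⟩
          cases n with
          | zero => simp at h; omega
          | succ m =>
              refine ⟨m, by simpa using hn, ?_⟩
              simp only [List.take_succ_cons, List.count_cons] at h
              by_cases h1 : c = '(' <;> by_cases h2 : c = ')' <;> simp_all <;> omega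

-- when B's cut is found, A's scan ends one position later (it also consumes the close paren)
lemma pvAFind_nonpos (t : List Char) (d : Int) (e : Nat) (hd : ¬ d > 0) :
    pvAFind t d e = e := by
  cases t <;> simp [pvAFind, hd]

-- when B's cut is found, A's scan ends one position later (it also consumes the close paren)
lemma pvAFind_of_pvBCut (t : List Char) (d : Int) (hd : 1 ≤ d) :
    ∀ j, pvBCut t (d - 1) 0 = some j → pvAFind t d 0 = j + 1 := by
  induction t generalizing d with
  | nil => intro j h; simp [pvBCut] at h
  | cons c rest ih =>
      intro j h
      simp only [pvBCut] at h
      set e := (d - 1 + if c = '(' then 1 else 0) - if c = ')' then 1 else 0 with he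
      set d' := (if c = '(' then d + 1 else if c = ')' then d - 1 else d) with hd'
      have hed : e = d' - 1 := by
        rw [he, hd']; by_cases h1 : c = '(' <;> by_cases h2 : c = ')' <;> simp_all
      have hda : d > 0 := by omega
      simp only [pvAFind, if_pos hda, ← hd']
      by_cases hneg : e < 0
      · rw [if_pos hneg] at h
        injection h with h; subst h
        exact pvAFind_nonpos rest d' (0 + 1) (by omega)
      · rw [if_neg hneg, pvBCut_shift] at h
        obtain ⟨j', hj', hj⟩ := Option.map_eq_some_iff.mp h
        have hr := ih d' (by omega) j' (by rw [← hed]; exact hj')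
        rw [pvAFind_shift, hr]
        omega

-- Python's params.split(",") characterized structurally
def pvSplit : List Char → List (List Char)
  | [] => [[]]
  | c :: rest =>
      if c = ',' then [] :: pvSplit rest
      else
        match pvSplit rest with
        | f :: fs => (c :: f) :: fs
        | [] => [[c]]

def pvGlue (x : List Char) : List (List Char) → List (List Char)
  | [] => [x]
  | f :: fs => (x ++ f) :: fs

lemma pvSplit_ne_nil (cs : List Char) : pvSplit cs ≠ [] := by
  cases cs with
  | nil => simp [pvSplit]
  | cons c rest =>
      simp only [pvSplit]
      split_ifs
      · simp
      · cases h : pvSplit rest <;> simp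

lemma pvGo_eq (l : List Char) : ∀ (fuel : Nat) (cur : List Char) (acc : List (List Char)),
    l.length < fuel →
    PySem.Chars.splitOn.go [','] fuel l cur acc = acc.reverse ++ pvGlue cur.reverse (pvSplit l) := by
  induction l with
  | nil =>
      intro fuel cur acc h
      match fuel, h with
      | fuel+1, _ => simp [PySem.Chars.splitOn.go, pvSplit, pvGlue]
  | cons c rest ih =>
      intro fuel cur acc h
      match fuel, h with
      | fuel+1, h =>
        by_cases hc : c = ','
        · subst hc
          have hpre : [','].isPrefixOf (',' :: rest) = true := by simp [List.isPrefixOf]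
          rw [PySem.Chars.splitOn.go]
          simp only [hpre, if_true, List.length_cons, List.length_nil, List.drop_succ_cons,
            List.drop_zero]
          rw [ih fuel [] (cur.reverse :: acc) (by simpa using Nat.lt_of_succ_lt_succ h)]
          cases hs : pvSplit rest with
          | nil => exact absurd hs (pvSplit_ne_nil rest)
          | cons f fs => simp [pvSplit, pvGlue, hs]
        · have hpre : [','].isPrefixOf (c :: rest) = false := by
            simp [List.isPrefixOf, Ne.symm hc]
          rw [PySem.Chars.splitOn.go]
          simp only [hpre, Bool.false_eq_true, if_false]
          rw [ih fuel (c :: cur) acc (Nat.lt_of_succ_lt_succ h)]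
          cases hs : pvSplit rest with
          | nil => exact absurd hs (pvSplit_ne_nil rest)
          | cons f fs => simp [pvSplit, pvGlue, hs, hc]

lemma pvSplitOn_comma (cs : List Char) : PySem.Chars.splitOn cs [','] = pvSplit cs := by
  rw [PySem.Chars.splitOn, pvGo_eq cs (cs.length + 1) [] [] (Nat.lt_succ_self _)]
  cases hs : pvSplit cs with
  | nil => exact absurd hs (pvSplit_ne_nil cs)
  | cons f fs => simp [pvGlue]

lemma pvBFrag_shift (fs : List (List Char)) (b p cnt : Int) :
    pvBFrag fs b p cnt = cnt + pvBFrag fs b p 0 := by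
  induction fs generalizing b p cnt with
  | nil => simp [pvBFrag]
  | cons f rest ih =>
      simp only [pvBFrag]
      by_cases hb : b = 0 ∧ p = 0
      · simp only [if_pos hb]; rw [ih _ _ (cnt + 1), ih _ _ (0 + 1)]; omega
      · simp only [if_neg hb]; rw [ih _ _ cnt]

-- the heart: B's fragment count equals A's top-level comma count
lemma pvFrag_eq (cs : List Char) (b p cnt : Int) :
    pvBFrag (pvSplit cs) b p cnt = pvACount cs b p (cnt + (if b = 0 ∧ p = 0 then 1 else 0)) := by
  induction cs generalizing b p cnt with
  | nil =>
      simp only [pvSplit, pvBFrag, pvACount]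
      split_ifs <;> omega
  | cons c rest ih =>
      by_cases hc : c = ','
      · subst hc
        simp only [pvSplit, if_true, pvBFrag, List.count_nil, Nat.cast_zero, add_zero, sub_zero]
        rw [ih, pvACount_cons]
        rw [if_neg (by decide : ¬ (',' : Char) = '['), if_neg (by decide : ¬ (',' : Char) = ']'),
            if_neg (by decide : ¬ (',' : Char) = '('), if_neg (by decide : ¬ (',' : Char) = ')')]
        simp only [true_and]
        congr 1
        split_ifs <;> omega
      · -- c is not a comma: it joins the first fragment of the tail split
        obtain ⟨f, fs, hs⟩ : ∃ f fs, pvSplit rest = f :: fs := by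
          cases h : pvSplit rest with
          | nil => exact absurd h (pvSplit_ne_nil rest)
          | cons f fs => exact ⟨f, fs, rfl⟩
        have hsplit : pvSplit (c :: rest) = (c :: f) :: fs := by
          simp only [pvSplit, if_neg hc, hs]
        rw [hsplit]
        simp only [pvBFrag, List.count_cons]
        set b1 : Int := b + (if c = '[' then 1 else 0) - (if c = ']' then 1 else 0) with hb1
        set p1 : Int := p + (if c = '(' then 1 else 0) - (if c = ')' then 1 else 0) with hp1
        have hbarg : b + ((f.count '[' + if c == '[' then 1 else 0 : Nat) : Int)
            - ((f.count ']' + if c == ']' then 1 else 0 : Nat) : Int)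
            = b1 + (f.count '[' : Int) - (f.count ']' : Int) := by
          rw [hb1]; simp only [beq_iff_eq]; split_ifs <;> push_cast <;> omega
        have hparg : p + ((f.count '(' + if c == '(' then 1 else 0 : Nat) : Int)
            - ((f.count ')' + if c == ')' then 1 else 0 : Nat) : Int)
            = p1 + (f.count '(' : Int) - (f.count ')' : Int) := by
          rw [hp1]; simp only [beq_iff_eq]; split_ifs <;> push_cast <;> omega
        rw [hbarg, hparg, pvBFrag_shift]
        have hkey : pvBFrag fs (b1 + (f.count '[' : Int) - (f.count ']' : Int))
            (p1 + (f.count '(' : Int) - (f.count ')' : Int)) 0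
            = pvACount rest b1 p1 0 := by
          have h1 : pvBFrag (f :: fs) b1 p1 0
              = pvACount rest b1 p1 (0 + (if b1 = 0 ∧ p1 = 0 then 1 else 0)) := by
            rw [← hs, ih]
          simp only [pvBFrag] at h1
          rw [pvBFrag_shift, pvACount_shift] at h1
          split_ifs at h1 <;> omega
        rw [hkey]
        have harg : (if c = '[' then b + 1 else if c = ']' then b - 1 else b) = b1 ∧
            (if c = '(' then p + 1 else if c = ')' then p - 1 else p) = p1 := by
          rw [hb1, hp1]
          constructor <;> (split_ifs <;> first | omega | simp_all)
        rw [pvACount_cons, harg.1, harg.2, if_neg (show ¬(c = ',' ∧ b = 0 ∧ p = 0) from fun h => hc h.1)]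
        conv_rhs => rw [pvACount_shift]
        generalize pvACount rest b1 p1 0 = q
        split_ifs <;> omega

lemma pvSlice_take (cs : List Char) (start k : Nat) (hs : 1 ≤ start) :
    PySem.List.slice cs (some (start : Int)) (some (((start + k : Nat) : Int) - 1))
      = (cs.drop start).take (k - 1) := by
  have h1 : (0 : Int) ≤ (start : Int) := by positivity
  have h2 : (0 : Int) ≤ ((start + k : Nat) : Int) - 1 := by
    have : (1 : Int) ≤ ((start + k : Nat) : Int) := by exact_mod_cast Nat.le_add_right_of_le hs
    omega
  rw [PySem.List.slice_toNat _ h1 h2]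
  have e1 : ((start : Int)).toNat = start := Int.toNat_natCast start
  have e2 : (((start + k : Nat) : Int) - 1).toNat = start + k - 1 := by omega
  rw [e1, e2]
  congr 1
  omega

-- ===== VERDICT =====
theorem extract_parameter_count_py_spec : Claim_equal_extract_parameter_count_py := by
  intro signature _ hpre
  unfold Spec_extract_parameter_count_py extract_parameter_count_py extract_parameter_count_py_alt
  unfold Pre_extract_parameter_count_py at hpre
  set cs := signature.toList with hcs
  by_cases hg : (!(PySem.Chars.isIn ['('] cs) || !(PySem.Chars.isIn [')'] cs)) = true
  · simp [hg]
  · simp only [hg, Bool.false_eq_true, if_false]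
    have hboth : PySem.Chars.isIn ['('] cs = true ∧ PySem.Chars.isIn [')'] cs = true := by
      constructor <;> [skip; skip] <;>
        (by_cases h1 : PySem.Chars.isIn ['('] cs = true <;>
         by_cases h2 : PySem.Chars.isIn [')'] cs = true <;> simp_all)
    set start := (PySem.Chars.find cs ['(']).toNat + 1 with hstart
    set t := cs.drop start with ht
    obtain ⟨n, hn, hcnt⟩ := hpre hboth
    have hsome : (pvBCut t 0 0).isSome = true := by
      rw [pvBCut_isSome t 0 le_rfl]
      exact ⟨n, hn, by omega⟩
    obtain ⟨cut, hcut⟩ := Option.isSome_iff_exists.mp hsome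
    have hk : pvAFind t 1 0 = cut + 1 :=
      pvAFind_of_pvBCut t 1 le_rfl cut (by simpa using hcut)
    have hshift : pvAFind t 1 start = start + pvAFind t 1 0 := pvAFind_shift t 1 start
    have hslice : PySem.List.slice cs (some (start : Int)) (some ((↑(pvAFind t 1 start) : Int) - 1))
        = t.take (pvAFind t 1 0 - 1) := by
      rw [hshift]
      exact pvSlice_take cs start (pvAFind t 1 0) (by omega)
    rw [hslice, hk]
    rw [hcut]
    simp only [Option.getD_some, Nat.add_sub_cancel]
    by_cases hp : PySem.Chars.strip (t.take cut) = []
    · simp [hp]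
    · rw [if_neg hp, if_neg hp]
      rw [pvSplitOn_comma, pvFrag_eq]
      norm_num
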